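-- pv_equiv track=rewrite | github.com/VectorOps/code | src/vocode/ui/terminal/colors.py | get_last_non_empty_line
-- ===== SOURCE A (Python) =====
-- from typing import List, Optional, Tuple, Any
--
-- def get_last_non_empty_line(
--     lines: List[List[Tuple[str, str]]],
-- ) -> Optional[List[Tuple[str, str]]]:
--     """
--     Given a list of formatted text lines, return the last line that is not empty.
--     A line is considered empty if it contains only whitespace.
--     """
--     for line in reversed(lines):
--         # Join all text fragments in the line
--         line_text = "".join(text for _, text in line)
--         if line_text.strip():
--             # Found a non-empty line
--             return line
--     return None
-- ===== SOURCE B (Python) =====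
-- from typing import List, Optional, Tuple
--
-- def get_last_non_empty_line(
--     lines: List[List[Tuple[str, str]]],
-- ) -> Optional[List[Tuple[str, str]]]:
--     """Single forward pass: remember the last line whose joined text is not
--     whitespace-only; return it (or None) after the scan."""
--     result = None
--     for line in lines:
--         line_text = "".join(text for _, text in line)
--         if line_text.strip():
--             result = line
--     return result
-- ===== Notes on version B (the rewrite author's own statement) =====
-- stated objective: alternative
-- what changed: Replaced the reverse-order early-exit scan with a single forward pass that overwrites an accumulator at every non-whitespace line and returns it after the loop.
import Mathlib
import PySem

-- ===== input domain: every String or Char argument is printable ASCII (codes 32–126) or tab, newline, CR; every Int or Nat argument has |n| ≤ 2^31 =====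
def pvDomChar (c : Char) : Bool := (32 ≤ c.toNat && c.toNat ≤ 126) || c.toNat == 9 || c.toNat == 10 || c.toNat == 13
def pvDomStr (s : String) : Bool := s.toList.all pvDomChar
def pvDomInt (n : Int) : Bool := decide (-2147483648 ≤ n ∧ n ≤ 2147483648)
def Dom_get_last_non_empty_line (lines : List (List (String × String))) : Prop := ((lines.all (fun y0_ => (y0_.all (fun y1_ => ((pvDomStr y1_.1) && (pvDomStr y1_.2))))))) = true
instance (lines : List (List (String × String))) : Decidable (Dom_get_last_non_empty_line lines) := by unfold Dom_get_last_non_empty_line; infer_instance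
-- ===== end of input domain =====

-- B replaces A's reverse early-exit scan with a single forward pass that keeps the last non-whitespace line in an accumulator (alternative decomposition, same cost; return value unchanged).


-- ===== PORT A =====
-- A scans the lines in reverse and returns at the first non-whitespace line.
def pvLineTextA (line : List (String × String)) : String :=
  PySem.Str.join "" (line.map (fun p => p.2))

def pvScanRevA : List (List (String × String)) → Option (List (String × String))
  | [] => none
  | l :: ls => if PySem.Str.strip (pvLineTextA l) ≠ "" then some l else pvScanRevA ls

def get_last_non_empty_line (lines : List (List (String × String))) : Option (List (String × String)) :=
  pvScanRevA lines.reverse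

-- ===== PORT B =====
-- B makes one forward pass, overwriting an accumulator at every non-whitespace line.
def pvLineTextB (line : List (String × String)) : String :=
  PySem.Str.join "" (line.map (fun p => p.2))

def get_last_non_empty_line_alt (lines : List (List (String × String))) : Option (List (String × String)) :=
  lines.foldl
    (fun result line =>
      if PySem.Str.strip (pvLineTextB line) ≠ "" then some line else result)
    none

-- ===== PRECONDITION & SPEC =====
def Spec_get_last_non_empty_line (lines : List (List (String × String))) (out : Option (List (String × String))) : Prop := out = get_last_non_empty_line_alt lines
instance (lines : List (List (String × String))) (out : Option (List (String × String))) : Decidable (Spec_get_last_non_empty_line lines out) := by unfold Spec_get_last_non_empty_line; infer_instance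

-- ===== CLAIM (what is proved, stated in full; the proofs are below) =====
def Claim_equal_get_last_non_empty_line : Prop := ∀ (lines : List (List (String × String))), Dom_get_last_non_empty_line lines → Spec_get_last_non_empty_line lines (get_last_non_empty_line lines)

-- ===== LEMMAS AND PROOFS =====

theorem pvScanRevA_append (l m : List (List (String × String))) :
    pvScanRevA (l ++ m) =
      match pvScanRevA l with
      | some y => some y
      | none => pvScanRevA m := by
  induction l with
  | nil => simp [pvScanRevA]
  | cons x xs ih =>
    simp only [List.cons_append, pvScanRevA]
    split <;> simp [ih]

theorem pvFoldB_eq (lines : List (List (String × String)))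
    (acc : Option (List (String × String))) :
    lines.foldl
      (fun result line =>
        if PySem.Str.strip (pvLineTextB line) ≠ "" then some line else result)
      acc =
      match pvScanRevA lines.reverse with
      | some y => some y
      | none => acc := by
  induction lines generalizing acc with
  | nil => simp [pvScanRevA]
  | cons x xs ih =>
    simp only [List.foldl_cons, List.reverse_cons, pvScanRevA_append]
    rw [ih]
    cases pvScanRevA xs.reverse with
    | some y => rfl
    | none =>
      simp only [pvScanRevA, pvLineTextA, pvLineTextB]
      split <;> rfl

-- ===== VERDICT (by name: the statement is the Claim_ definition above) =====
theorem get_last_non_empty_line_spec : Claim_equal_get_last_non_empty_line := by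
  intro lines _
  unfold Spec_get_last_non_empty_line get_last_non_empty_line get_last_non_empty_line_alt
  rw [pvFoldB_eq]
  cases pvScanRevA lines.reverse <;> rfl
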